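-- pv_equiv track=rewrite | github.com/AlunStokes/collatz | src/self_ref.py | get_inv_P_orbit
-- ===== SOURCE A (Python) =====
-- def vp(x, p):
--     if x == 0:
--         return 0
--     if x == 1:
--         return 0
--     n = 0
--     while x % p == 0:
--         x //= p
--         n += 1
--     return n
--
-- def collatz_accel(x):
--     code = ''
--     n = 0
--
--     l = [x]
--     while x != 1:
--         n += 1
--         if x % 2 == 1:
--             x = (3*x + 1) // 2**(vp(3*x + 1, 2))
--             code += '1'
--         else:
--             x = x // 2**(vp(x, 2))
--             code += '0'
--         l.append(x)
--
--     res = {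
--     'iter': n,
--     'code': code,
--     'values': l
--     }
--
--     return res
--
-- def egcd(a, b):
--     if a == 0:
--         return (b, 0, 1)
--     else:
--         g, y, x = egcd(b % a, a)
--         return (g, x - (b // a) * y, y)
--
-- def mod_inv(a, m):
--     g, x, y = egcd(a, m)
--     if g != 1:
--         return None
--     else:
--         return x % m
--
-- def get_inv_P_orbit(bound, include_even=False):
--     L = [1]
--     n = 1
--     step = 2
--     if include_even:
--         step = 1
--     while n < bound:
--         if n % 3 == 0:
--             n += step
--             continue
--         V = collatz_accel(n)['values']
--         V = [v % n for v in V]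
--         r = n - mod_inv(3, n)
--         if r in V:
--             L.append(n)
--         n += step
--     return L
-- ===== SOURCE B (Python) =====
-- def get_inv_P_orbit(bound, include_even=False):
--     L = [1]
--     step = 1 if include_even else 2
--     n = 1
--     while n < bound:
--         if n % 3 != 0:
--             # closed-form inverse of 3 mod n (n % 3 != 0), instead of extended gcd
--             inv = ((2 * n + 1) // 3 if n % 3 == 1 else (n + 1) // 3) % n
--             r = n - inv
--             # fused early-exit scan of the accelerated trajectory, no list built
--             x = n
--             while True:
--                 if x % n == r:
--                     L.append(n)
--                     break
--                 if x == 1: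
--                     break
--                 if x % 2 == 1:
--                     x = 3 * x + 1
--                 while x % 2 == 0:
--                     x //= 2
--         n += step
--     return L
-- ===== Notes on version B (the rewrite author's own statement) =====
-- stated objective: faster
-- what changed: B replaces A's build-orbit-list / map-mod / membership-scan pipeline with a single fused early-exit scan of the accelerated trajectory, and replaces the recursive extended-gcd modular inverse by the closed-form inverse of 3 mod n ((2n+1)//3 or (n+1)//3 by residue).
import Mathlib
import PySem

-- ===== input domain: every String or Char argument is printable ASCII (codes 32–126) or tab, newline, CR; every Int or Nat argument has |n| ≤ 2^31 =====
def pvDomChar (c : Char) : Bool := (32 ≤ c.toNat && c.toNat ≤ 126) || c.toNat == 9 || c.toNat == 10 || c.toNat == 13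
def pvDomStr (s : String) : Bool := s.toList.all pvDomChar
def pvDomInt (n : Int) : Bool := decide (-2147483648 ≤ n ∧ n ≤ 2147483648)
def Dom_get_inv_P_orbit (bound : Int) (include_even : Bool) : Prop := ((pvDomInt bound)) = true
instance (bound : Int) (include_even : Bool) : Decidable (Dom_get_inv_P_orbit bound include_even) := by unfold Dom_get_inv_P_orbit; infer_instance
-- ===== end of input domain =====

-- B replaces A's build-orbit-list / map-mod / membership-scan and its extended-gcd modular
-- inverse by a fused early-exit scan of the trajectory and a closed-form inverse of 3 mod n.
-- The inner `while x != 1` loops (termination = the Collatz conjecture) are ported with a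
-- fuel guard of 1000000 accelerated steps on BOTH sides; fuel guards here only make the
-- recursions total and are never reached when the corresponding Python loops terminate.
def pvFuel : Nat := 1000000

-- ===== PORT A =====
-- vp(x, p): while x % p == 0: x //= p; n += 1.  Fuel x.natAbs bounds the divisions for the
-- only call site p = 2 (each division at least halves |x|).
def vpLoop : Nat → Int → Int → Int → Int
  | 0, _, _, n => n
  | f+1, x, p, n =>
    if PySem.Int.mod x p = 0 then vpLoop f (PySem.Int.floordiv x p) p (n + 1) else n

def vp (x p : Int) : Int :=
  if x = 0 then 0 else if x = 1 then 0 else vpLoop x.natAbs x p 0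

-- collatz_accel: returns (iter, code, values) for the dict {'iter': n, 'code': code, 'values': l}.
-- 2**v with v ≥ 0 is ported as 2 ^ v.toNat.
def collatzLoop : Nat → Int → Int → String → List Int → Int × String × List Int
  | 0, _, n, code, l => (n, code, l)
  | f+1, x, n, code, l =>
    if x = 1 then (n, code, l)
    else if PySem.Int.mod x 2 = 1 then
      let x' := PySem.Int.floordiv (3*x + 1) (2 ^ (vp (3*x + 1) 2).toNat)
      collatzLoop f x' (n + 1) (code ++ "1") (l ++ [x'])
    else
      let x' := PySem.Int.floordiv x (2 ^ (vp x 2).toNat)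
      collatzLoop f x' (n + 1) (code ++ "0") (l ++ [x'])

def collatz_accel (x : Int) : Int × String × List Int := collatzLoop pvFuel x 0 "" [x]

-- egcd(a, b): |a| strictly decreases on each recursive call (the second argument of a call is
-- the previous divisor), so fuel a.natAbs + 1 always suffices and the 0-fuel arm is unreachable.
def egcdAux : Nat → Int → Int → Int × Int × Int
  | 0, _, b => (b, 0, 1)
  | f+1, a, b =>
    if a = 0 then (b, 0, 1)
    else
      -- g, y, x = egcd(b % a, a); return (g, x - (b // a) * y, y)
      let t := egcdAux f (PySem.Int.mod b a) a
      (t.1, t.2.2 - (PySem.Int.floordiv b a) * t.2.1, t.2.1)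

def egcd (a b : Int) : Int × Int × Int := egcdAux (a.natAbs + 1) a b

def mod_inv (a m : Int) : Option Int :=
  let t := egcd a m
  if t.1 ≠ 1 then none else some (PySem.Int.mod t.2.1 m)

-- while n < bound … n += step, with step = 1 if include_even else 2 (written inline);
-- n advances by at least 1 per iteration, so fuel (bound - 1).toNat covers every iteration.
def loopA (bound : Int) (include_even : Bool) : Nat → Int → List Int → List Int
  | 0, _, L => L
  | f+1, n, L =>
    if n < bound then
      if PySem.Int.mod n 3 = 0 then
        loopA bound include_even f (n + (if include_even then 1 else 2)) L
      else
        let V := ((collatz_accel n).2.2).map (fun v => PySem.Int.mod v n)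
        -- r = n - mod_inv(3, n); a None here would be a Python TypeError, unreachable in the
        -- loop (n ≥ 1 and n % 3 ≠ 0, so gcd(3, n) = 1); the 0 arm is never taken.
        let r := match mod_inv 3 n with
                 | some v => n - v
                 | none => 0
        if V.contains r then
          loopA bound include_even f (n + (if include_even then 1 else 2)) (L ++ [n])
        else
          loopA bound include_even f (n + (if include_even then 1 else 2)) L
    else L

def get_inv_P_orbit (bound : Int) (include_even : Bool) : List Int :=
  loopA bound include_even (bound - 1).toNat 1 [1]

-- ===== PORT B =====
-- while x % 2 == 0: x //= 2.  Fuel x.natAbs bounds the divisions for every positive x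
-- (Python's loop would not terminate at 0, which no caller reaches).
def stripAux : Nat → Int → Int
  | 0, x => x
  | f+1, x =>
    if PySem.Int.mod x 2 = 0 then stripAux f (PySem.Int.floordiv x 2) else x

def stripTwos (x : Int) : Int := stripAux x.natAbs x

-- closed-form inverse of 3 mod n
def inv3 (n : Int) : Int :=
  PySem.Int.mod
    (if PySem.Int.mod n 3 = 1 then PySem.Int.floordiv (2*n + 1) 3
     else PySem.Int.floordiv (n + 1) 3) n

-- the fused early-exit scan: while True: check x % n == r; stop at 1; accelerated step
def scanB : Nat → Int → Int → Int → Bool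
  | f, n, r, x =>
    if PySem.Int.mod x n = r then true
    else if x = 1 then false
    else match f with
      | 0 => false
      | f+1 => scanB f n r (stripTwos (if PySem.Int.mod x 2 = 1 then 3*x + 1 else x))

def loopB (bound : Int) (include_even : Bool) : Nat → Int → List Int → List Int
  | 0, _, L => L
  | f+1, n, L =>
    if n < bound then
      let L' := if PySem.Int.mod n 3 ≠ 0 then
          (if scanB pvFuel n (n - inv3 n) n then L ++ [n] else L)
        else L
      loopB bound include_even f (n + (if include_even then 1 else 2)) L'
    else L

def get_inv_P_orbit_alt (bound : Int) (include_even : Bool) : List Int :=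
  loopB bound include_even (bound - 1).toNat 1 [1]

-- ===== PRECONDITION & SPEC =====
def Spec_get_inv_P_orbit (bound : Int) (include_even : Bool) (out : List Int) : Prop := out = get_inv_P_orbit_alt bound include_even
instance (bound : Int) (include_even : Bool) (out : List Int) : Decidable (Spec_get_inv_P_orbit bound include_even out) := by unfold Spec_get_inv_P_orbit; infer_instance

-- ===== CLAIM (what is proved, stated in full; the proofs are below) =====
def Claim_equal_get_inv_P_orbit : Prop := ∀ (bound : Int) (include_even : Bool), Dom_get_inv_P_orbit bound include_even → Spec_get_inv_P_orbit bound include_even (get_inv_P_orbit bound include_even)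

-- ===== LEMMAS AND PROOFS =====

theorem vpLoop_shift (f : Nat) : ∀ (x p n : Int), vpLoop f x p n = n + vpLoop f x p 0 := by
  induction f with
  | zero => intro x p n; simp [vpLoop]
  | succ f ih =>
    intro x p n
    simp only [vpLoop]
    split
    · rw [ih _ p (n + 1), ih _ p (0 + 1)]; ring
    · simp

theorem vpLoop_nonneg (f : Nat) : ∀ (x p n : Int), n ≤ vpLoop f x p n := by
  induction f with
  | zero => intro x p n; simp [vpLoop]
  | succ f ih =>
    intro x p n
    simp only [vpLoop]
    split
    · exact le_trans (by omega) (ih _ p (n + 1))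
    · exact le_refl n

theorem stripAux_pos (f : Nat) : ∀ x : Int, 1 ≤ x → 1 ≤ stripAux f x := by
  induction f with
  | zero => intro x hx; simpa [stripAux] using hx
  | succ f ih =>
    intro x hx
    simp only [stripAux]
    split
    · rename_i hmod
      obtain ⟨k, hk⟩ := (PySem.Int.mod_eq_zero_iff_dvd x 2).mp hmod
      have hdiv : PySem.Int.floordiv x 2 = k := by
        rw [PySem.Int.floordiv_eq_ediv_of_pos (by omega), hk,
          Int.mul_ediv_cancel_left k (by omega)]
      rw [hdiv]
      exact ih k (by omega)
    · exact hx

theorem stripTwos_pos (x : Int) (hx : 1 ≤ x) : 1 ≤ stripTwos x :=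
  stripAux_pos x.natAbs x hx

theorem stripAux_congr (f : Nat) : ∀ (g : Nat) (x : Int), 1 ≤ x → x.natAbs ≤ f → x.natAbs ≤ g →
    stripAux f x = stripAux g x := by
  induction f with
  | zero => intro g x hx hf hg; omega
  | succ f ih =>
    intro g x hx hf hg
    match g with
    | 0 => omega
    | g+1 =>
      simp only [stripAux]
      split
      · rename_i hmod
        obtain ⟨k, hk⟩ := (PySem.Int.mod_eq_zero_iff_dvd x 2).mp hmod
        have hdiv : PySem.Int.floordiv x 2 = k := by
          rw [PySem.Int.floordiv_eq_ediv_of_pos (by omega), hk,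
            Int.mul_ediv_cancel_left k (by omega)]
        rw [hdiv]
        exact ih g k (by omega) (by omega) (by omega)
      · rfl

theorem stripAux_eq_stripTwos (f : Nat) (x : Int) (hx : 1 ≤ x) (hf : x.natAbs ≤ f) :
    stripAux f x = stripTwos x :=
  stripAux_congr f x.natAbs x hx hf (le_refl _)

theorem floordiv_vpLoop_eq_strip (f : Nat) :
    ∀ x : Int, 1 ≤ x → x.natAbs ≤ f →
      PySem.Int.floordiv x (2 ^ (vpLoop f x 2 0).toNat) = stripTwos x := by
  induction f with
  | zero => intro x hx hf; omega
  | succ f ih =>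
    intro x hx hf
    by_cases hmod : PySem.Int.mod x 2 = 0
    · obtain ⟨k, hk⟩ := (PySem.Int.mod_eq_zero_iff_dvd x 2).mp hmod
      have hdiv : PySem.Int.floordiv x 2 = k := by
        rw [PySem.Int.floordiv_eq_ediv_of_pos (by omega), hk,
          Int.mul_ediv_cancel_left k (by omega)]
      have hk1 : 1 ≤ k := by omega
      have hc0 : 0 ≤ vpLoop f k 2 0 := vpLoop_nonneg f k 2 0
      have hstep : vpLoop (f + 1) x 2 0 = vpLoop f k 2 0 + 1 := by
        simp only [vpLoop, if_pos hmod, hdiv]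
        rw [vpLoop_shift f k 2 (0 + 1)]; ring
      rw [hstep]
      have htn : (vpLoop f k 2 0 + 1).toNat = (vpLoop f k 2 0).toNat + 1 := by omega
      rw [htn, pow_succ]
      have hx2 : PySem.Int.floordiv x (2 ^ (vpLoop f k 2 0).toNat * 2) = PySem.Int.floordiv k (2 ^ (vpLoop f k 2 0).toNat) := by
        rw [PySem.Int.floordiv_eq_ediv_of_pos (by positivity),
          PySem.Int.floordiv_eq_ediv_of_pos (by positivity), hk, mul_comm (2 ^ (vpLoop f k 2 0).toNat) 2]
        exact Int.mul_ediv_mul_of_pos _ _ (by omega)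
      rw [hx2, ih k hk1 (by omega)]
      have hx1 : stripTwos x = stripTwos k := by
        have hn : x.natAbs = (x.natAbs - 1) + 1 := by omega
        rw [stripTwos, hn]
        simp only [stripAux, if_pos hmod, hdiv]
        exact stripAux_eq_stripTwos _ k hk1 (by omega)
      rw [hx1]
    · have h0 : vpLoop (f + 1) x 2 0 = 0 := by simp only [vpLoop, if_neg hmod]
      rw [h0]
      have hx1 : stripTwos x = x := by
        rw [stripTwos]
        have hn : x.natAbs = (x.natAbs - 1) + 1 := by omega
        rw [hn]
        simp only [stripAux, if_neg hmod]
      rw [hx1]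
      simp

theorem div_vp_eq_strip (x : Int) (hx : 1 ≤ x) :
    PySem.Int.floordiv x (2 ^ (vp x 2).toNat) = stripTwos x := by
  by_cases h1 : x = 1
  · subst h1
    have hv : vp 1 2 = 0 := by simp [vp]
    rw [hv]
    decide
  · rw [vp, if_neg (by omega), if_neg h1]
    exact floordiv_vpLoop_eq_strip x.natAbs x hx (le_refl _)

-- the suffix of orbit values A's collatz loop appends
def valsA : Nat → Int → List Int
  | 0, _ => []
  | f+1, x =>
    if x = 1 then []
    else
      let x' := if PySem.Int.mod x 2 = 1
                then PySem.Int.floordiv (3*x + 1) (2 ^ (vp (3*x + 1) 2).toNat)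
                else PySem.Int.floordiv x (2 ^ (vp x 2).toNat)
      x' :: valsA f x'

theorem collatzLoop_values (f : Nat) :
    ∀ (x n : Int) (code : String) (l : List Int),
      (collatzLoop f x n code l).2.2 = l ++ valsA f x := by
  induction f with
  | zero => intro x n code l; simp [collatzLoop, valsA]
  | succ f ih =>
    intro x n code l
    simp only [collatzLoop, valsA]
    split
    · simp
    · split
      · rw [ih]; simp
      · rw [ih]; simp

-- A's one accelerated step equals B's strip-based step
theorem stepA_eq_strip (x : Int) (hx : 2 ≤ x) :
    (if PySem.Int.mod x 2 = 1
     then PySem.Int.floordiv (3*x + 1) (2 ^ (vp (3*x + 1) 2).toNat)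
     else PySem.Int.floordiv x (2 ^ (vp x 2).toNat))
      = stripTwos (if PySem.Int.mod x 2 = 1 then 3*x + 1 else x) := by
  split
  · exact div_vp_eq_strip (3*x + 1) (by omega)
  · exact div_vp_eq_strip x (by omega)

theorem scanB_eq_contains (n r : Int) (f : Nat) :
    ∀ x : Int, 1 ≤ x →
      scanB f n r x = ((x :: valsA f x).map (fun v => PySem.Int.mod v n)).contains r := by
  induction f with
  | zero =>
    intro x hx
    simp only [scanB, valsA, List.map, List.contains]
    by_cases h : PySem.Int.mod x n = r
    · simp [h]
    · simp [h, Ne.symm h]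
  | succ f ih =>
    intro x hx
    by_cases h : PySem.Int.mod x n = r
    · simp only [scanB, if_pos h]
      simp [h]
    · by_cases h1 : x = 1
      · subst h1
        simp only [scanB, if_neg h, valsA]
        simp [Ne.symm h]
      · have hx2 : 2 ≤ x := by omega
        have hstep := stepA_eq_strip x hx2
        have hpos : 1 ≤ stripTwos (if PySem.Int.mod x 2 = 1 then 3*x + 1 else x) := by
          apply stripTwos_pos
          split <;> omega
        simp only [scanB, if_neg h, if_neg h1]
        rw [ih _ hpos]
        simp only [valsA, if_neg h1]
        rw [hstep]
        simp [Ne.symm h]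

-- closed computations of egcd's recursion on the two possible residues of n mod 3
theorem egcdAux_one_three : egcdAux 3 1 3 = (1, 1, 0) := by decide

theorem egcdAux_two_three : egcdAux 3 2 3 = (1, -1, 1) := by decide

theorem mod_inv_eq_inv3 (n : Int) (hn : 1 ≤ n) (h3 : PySem.Int.mod n 3 ≠ 0) :
    mod_inv 3 n = some (inv3 n) := by
  have hnn := PySem.Int.mod_nonneg (a := n) (b := 3) (by omega)
  have hlt := PySem.Int.mod_lt (a := n) (b := 3) (by omega)
  have hqid := PySem.Int.floordiv_mul_add_mod n 3
  have hemod : ∀ a : Int, PySem.Int.mod a n = a % n :=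
    fun a => PySem.Int.mod_eq_emod_of_pos (by omega)
  have hmod2 : PySem.Int.mod n 3 = 1 ∨ PySem.Int.mod n 3 = 2 := by omega
  have hunfold : egcd 3 n =
      ((egcdAux 3 (PySem.Int.mod n 3) 3).1,
       (egcdAux 3 (PySem.Int.mod n 3) 3).2.2
         - (PySem.Int.floordiv n 3) * (egcdAux 3 (PySem.Int.mod n 3) 3).2.1,
       (egcdAux 3 (PySem.Int.mod n 3) 3).2.1) := by
    show egcdAux 4 3 n = _
    simp only [egcdAux]
    norm_num
  rcases hmod2 with hm | hm
  · have hn3 : n = 3 * PySem.Int.floordiv n 3 + 1 := by omega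
    have hegcd : egcd 3 n = (1, -(PySem.Int.floordiv n 3), 1) := by
      rw [hunfold, hm, egcdAux_one_three]
      norm_num
    have hfd : PySem.Int.floordiv (2*n + 1) 3 = 2 * PySem.Int.floordiv n 3 + 1 := by
      rw [(PySem.Int.floordiv_eq_iff_of_pos (a := 2*n + 1) (b := 3)
        (q := 2 * PySem.Int.floordiv n 3 + 1) (by omega))]
      omega
    rw [mod_inv]
    simp only [hegcd]
    norm_num
    rw [inv3, if_pos hm, hfd, hemod, hemod]
    have hq2 : PySem.Int.floordiv n 3 = n / 3 := PySem.Int.floordiv_eq_ediv_of_pos (by omega)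
    rw [hq2] at hn3 ⊢
    rw [Int.emod_eq_emod_iff_emod_sub_eq_zero]
    have he : -(n / 3) - (2 * (n / 3) + 1) = -n := by omega
    rw [he]
    exact Int.emod_eq_zero_of_dvd (dvd_neg.mpr dvd_rfl)
  · have hn3 : n = 3 * PySem.Int.floordiv n 3 + 2 := by omega
    have hegcd : egcd 3 n = (1, 1 + PySem.Int.floordiv n 3, -1) := by
      rw [hunfold, hm, egcdAux_two_three]
      norm_num
    have hfd : PySem.Int.floordiv (n + 1) 3 = PySem.Int.floordiv n 3 + 1 := by
      rw [(PySem.Int.floordiv_eq_iff_of_pos (a := n + 1) (b := 3)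
        (q := PySem.Int.floordiv n 3 + 1) (by omega))]
      omega
    rw [mod_inv]
    simp only [hegcd]
    norm_num
    rw [inv3, if_neg (by omega), hfd, hemod, hemod]
    have hq2 : PySem.Int.floordiv n 3 = n / 3 := PySem.Int.floordiv_eq_ediv_of_pos (by omega)
    rw [hq2]
    ring_nf

theorem loop_eq (bound : Int) (ie : Bool) :
    ∀ (f : Nat) (n : Int) (L : List Int), 1 ≤ n →
      loopA bound ie f n L = loopB bound ie f n L := by
  intro f
  induction f with
  | zero => intro n L _; rfl
  | succ f ih =>
    intro n L hn
    by_cases hnb : n < bound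
    · have hn' : 1 ≤ n + (if ie then 1 else 2) := by split <;> omega
      by_cases h3 : PySem.Int.mod n 3 = 0
      · simp only [loopA, loopB, if_pos hnb, if_pos h3, if_neg (not_not_intro h3)]
        exact ih _ _ hn'
      · have hr : (match mod_inv 3 n with | some v => n - v | none => (0:Int)) = n - inv3 n := by
          rw [mod_inv_eq_inv3 n hn h3]
        have hV : ((collatz_accel n).2.2).map (fun v => PySem.Int.mod v n)
            = (n :: valsA pvFuel n).map (fun v => PySem.Int.mod v n) := by
          rw [collatz_accel, collatzLoop_values]
          simp
        have hscan : scanB pvFuel n (n - inv3 n) n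
            = (((collatz_accel n).2.2).map (fun v => PySem.Int.mod v n)).contains (n - inv3 n) := by
          rw [hV]; exact scanB_eq_contains n (n - inv3 n) pvFuel n hn
        simp only [loopA, loopB, if_pos hnb, if_neg h3, if_pos h3, hr, ← hscan]
        split
        · exact ih _ _ hn'
        · exact ih _ _ hn'
    · simp only [loopA, loopB, if_neg hnb]

-- ===== VERDICT (by name: the statement is the Claim_ definition above) =====
theorem get_inv_P_orbit_spec : Claim_equal_get_inv_P_orbit := by
  intro bound include_even _
  unfold Spec_get_inv_P_orbit get_inv_P_orbit get_inv_P_orbit_alt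
  exact loop_eq bound include_even (bound - 1).toNat 1 [1] (le_refl _)
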